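-- pv_equiv track=rewrite | github.com/df09/eng | src/_topics/pronouns.py | get_duplicated_translations
-- ===== SOURCE A (Python) =====
-- from collections import defaultdict
--
-- def get_duplicated_translations(data):
--     translation_occurrences = defaultdict(list)
--     for pronoun_class, pronoun_details in data.items():
--         for pronoun, details in pronoun_details.items():
--             translation = details.get("translation", "")
--             if translation:
--                 translations = [t.strip() for t in translation.split(',')]
--                 for trans in translations:
--                     translation_occurrences[trans].append(f"{pronoun_class} - {pronoun}")
--     return {key: value for key, value in translation_occurrences.items() if len(value) > 1}
-- ===== SOURCE B (Python) =====
-- def get_duplicated_translations(data):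
--     # Flatten once into (translation, place) pairs; then, for each distinct translation
--     # (first-occurrence order via dict.fromkeys), rescan the flat list to collect its
--     # places and keep it only if it occurs more than once. No accumulator dict, no counter.
--     pairs = [
--         (t.strip(), f"{pronoun_class} - {pronoun}")
--         for pronoun_class, pronoun_details in data.items()
--         for pronoun, details in pronoun_details.items()
--         if details.get("translation", "")
--         for t in details.get("translation", "").split(',')
--     ]
--     result = {}
--     for key in dict.fromkeys(t for t, _ in pairs):
--         places = [p for t, p in pairs if t == key]
--         if len(places) > 1:
--             result[key] = places
--     return result
-- ===== Notes on version B (the rewrite author's own statement) =====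
-- stated objective: alternative
-- what changed: A grows a defaultdict of place-lists inside nested loops and filters its items afterwards; B keeps no dictionary at all: it flattens the input once into (translation, place) pairs, dedups the translation keys, and for each distinct key rescans the flat pair list to collect its places, emitting it only when more than one place is found.
import Mathlib
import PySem

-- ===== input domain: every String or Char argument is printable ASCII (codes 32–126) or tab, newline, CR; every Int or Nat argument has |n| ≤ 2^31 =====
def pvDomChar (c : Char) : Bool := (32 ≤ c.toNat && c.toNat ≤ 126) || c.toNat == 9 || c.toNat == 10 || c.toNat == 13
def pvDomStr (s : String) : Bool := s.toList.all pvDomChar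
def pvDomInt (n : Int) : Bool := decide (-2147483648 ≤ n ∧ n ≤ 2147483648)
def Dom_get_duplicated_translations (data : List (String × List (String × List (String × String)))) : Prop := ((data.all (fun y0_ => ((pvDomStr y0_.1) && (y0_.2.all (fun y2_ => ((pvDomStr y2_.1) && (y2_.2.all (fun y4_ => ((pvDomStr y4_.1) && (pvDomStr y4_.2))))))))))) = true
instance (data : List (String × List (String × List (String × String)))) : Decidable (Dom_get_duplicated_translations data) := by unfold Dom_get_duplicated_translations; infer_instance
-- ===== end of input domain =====

-- B replaces A's incrementally-grown defaultdict + post-hoc length filter by flatten once /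
-- dedup the translation keys / per-key rescan of the flat pair list; same values and key
-- order, no speed claim (alternative).

-- ===== PORT A =====
-- translation.split(',') with the literal non-empty separator "," never raises: split? is always `some`.
def get_duplicated_translations (data : List (String × List (String × List (String × String)))) : List (String × List String) :=
  let occ : PySem.Dict String (List String) :=
    data.foldl (fun occ cls =>
      cls.2.foldl (fun occ pr =>
        let translation := (PySem.Dict.ofList pr.2).getD "translation" ""
        if translation ≠ "" then
          let translations := ((PySem.Str.split? translation ",").getD []).map (fun t => PySem.Str.strip t)
          -- defaultdict(list): translation_occurrences[trans].append(f"{pronoun_class} - {pronoun}")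
          translations.foldl (fun occ trans =>
            occ.modify trans [] (fun v => v ++ [cls.1 ++ " - " ++ pr.1])) occ
        else occ) occ) PySem.Dict.empty
  occ.items.filter (fun kv => kv.2.length > 1)

-- ===== PORT B =====
-- the flat list comprehension of Source B: (t.strip(), f"{pronoun_class} - {pronoun}") pairs
def pvPairsB (data : List (String × List (String × List (String × String)))) : List (String × String) :=
  data.flatMap (fun cls => cls.2.flatMap (fun pr =>
    let tr := (PySem.Dict.ofList pr.2).getD "translation" ""
    if tr ≠ "" then
      ((PySem.Str.split? tr ",").getD []).map (fun t => (PySem.Str.strip t, cls.1 ++ " - " ++ pr.1))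
    else []))

def get_duplicated_translations_alt (data : List (String × List (String × List (String × String)))) : List (String × List String) :=
  let pairs := pvPairsB data
  -- for key in dict.fromkeys(t for t, _ in pairs): places = [p for t, p in pairs if t == key]; if len > 1: result[key] = places
  (PySem.List.dedup (pairs.map Prod.fst)).foldl (fun res key =>
    let places := (pairs.filter (fun p => p.1 == key)).map Prod.snd
    if places.length > 1 then res ++ [(key, places)] else res) []

-- ===== PRECONDITION & SPEC =====
def Spec_get_duplicated_translations (data : List (String × List (String × List (String × String)))) (out : List (String × List String)) : Prop := out = get_duplicated_translations_alt data
instance (data : List (String × List (String × List (String × String)))) (out : List (String × List String)) : Decidable (Spec_get_duplicated_translations data out) := by unfold Spec_get_duplicated_translations; infer_instance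

-- ===== CLAIM (what is proved, stated in full; the proofs are below) =====
def Claim_equal_get_duplicated_translations : Prop := ∀ (data : List (String × List (String × List (String × String)))), Dom_get_duplicated_translations data → Spec_get_duplicated_translations data (get_duplicated_translations data)

-- ===== LEMMAS AND PROOFS =====

-- A's nested loops build exactly the fold of the defaultdict-append step over the flat pair list.
lemma occ_eq (data : List (String × List (String × List (String × String))))
    (d : PySem.Dict String (List String)) :
    data.foldl (fun occ cls =>
      cls.2.foldl (fun occ pr =>
        if (PySem.Dict.ofList pr.2).getD "translation" "" ≠ "" then
          (((PySem.Str.split? ((PySem.Dict.ofList pr.2).getD "translation" "") ",").getD []).map (fun t => PySem.Str.strip t)).foldl (fun occ trans =>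
            occ.modify trans [] (fun v => v ++ [cls.1 ++ " - " ++ pr.1])) occ
        else occ) occ) d
    = (pvPairsB data).foldl (fun d p => d.modify p.1 [] (fun v => v ++ [p.2])) d := by
  unfold pvPairsB
  rw [List.foldl_flatMap]
  congr 1
  funext occ cls
  rw [List.foldl_flatMap]
  congr 1
  funext occ pr
  by_cases h : (PySem.Dict.ofList pr.2).getD "translation" "" ≠ ""
  · rw [if_pos h, if_pos h]
    rw [List.foldl_map]
    conv_rhs => rw [List.foldl_map]
  · simp only [h, if_false]
    rfl

-- the grouping dict of a flat pair list, characterised by its items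
def pvDictOf (L : List (String × String)) : PySem.Dict String (List String) :=
  L.foldl (fun d p => d.modify p.1 [] (fun v => v ++ [p.2])) PySem.Dict.empty

lemma pvDictOf_items (L : List (String × String)) :
    (pvDictOf L).items
      = (PySem.Set.ofList (L.map Prod.fst)).map
          (fun k => (k, (L.filter (fun p => p.1 == k)).map Prod.snd)) := by
  have hnd : (pvDictOf L).keys.Nodup := by
    have := PySem.Dict.nodup_keys_foldl_modify_key (κ := String) (ν := List String) L Prod.fst []
      (fun _ p => (fun v => v ++ [p.2])) PySem.Dict.empty (by simp [PySem.Dict.keys_empty])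
    exact this
  rw [PySem.Dict.items_eq_map_keys _ hnd []]
  have hkeys : (pvDictOf L).keys = PySem.Set.ofList (L.map Prod.fst) := by
    have := PySem.Dict.keys_foldl_modify_key (κ := String) (ν := List String) L Prod.fst []
      (fun _ p => (fun v => v ++ [p.2])) PySem.Dict.empty
    simpa [pvDictOf, PySem.Dict.keys_empty] using this
  rw [hkeys]
  apply List.map_congr_left
  intro k _
  have := PySem.Dict.getD_foldl_modify_append L PySem.Dict.empty k
  simp only [pvDictOf]
  rw [this]
  simp [PySem.Dict.getD_empty]

theorem get_duplicated_translations_main (data : List (String × List (String × List (String × String)))) :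
    get_duplicated_translations data = get_duplicated_translations_alt data := by
  simp only [get_duplicated_translations, get_duplicated_translations_alt]
  rw [occ_eq]
  set P := pvPairsB data with hP
  -- A side: items of the grouping dict, filtered by value length
  rw [show (P.foldl (fun d p => d.modify p.1 [] (fun v => v ++ [p.2])) PySem.Dict.empty) = pvDictOf P from rfl]
  rw [pvDictOf_items, List.filter_map]
  -- B side: dedup-then-rescan fold is filter-then-map over the deduped keys
  rw [PySem.List.dedup_eq_ofList]
  have h := PySem.List.foldl_append_if
    (p := fun k => decide (((P.filter (fun p => p.1 == k)).map Prod.snd).length > 1))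
    (f := fun k => (k, (P.filter (fun p => p.1 == k)).map Prod.snd))
    (l := PySem.Set.ofList (P.map Prod.fst)) (acc := [])
  simp only [decide_eq_true_eq] at h
  rw [h]
  simp only [List.nil_append]
  rfl

-- ===== VERDICT (by name: the statement is the Claim_ definition above) =====
theorem get_duplicated_translations_spec : Claim_equal_get_duplicated_translations := by
  intro data _
  unfold Spec_get_duplicated_translations
  exact get_duplicated_translations_main data
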